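-- pv_equiv track=rewrite | github.com/Tim4316/CS-111-Python- | Problem Sets/PS 3/ps3pr4.py | negate_last
-- ===== SOURCE A (Python) =====
-- def negate_last(n, values):
--     """ return a version of values in which only the last occurrence
--         of n has been negated
--     """
--     if values == []:
--         return []
--     elif n == values[-1]:
--         return values[:-1] + [-1 * (values[-1])]
--     else:
--         negate_last_rest = negate_last(n, values[:-1])
--         return negate_last_rest + [values[-1]]
-- ===== SOURCE B (Python) =====
-- def negate_last(n, values):
--     """ return a version of values in which only the last occurrence
--         of n has been negated
--     """
--     idx = None
--     for i, v in enumerate(values):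
--         if v == n:
--             idx = i
--     result = list(values)
--     if idx is not None:
--         result[idx] = -1 * result[idx]
--     return result
-- ===== Notes on version B (the rewrite author's own statement) =====
-- stated objective: faster
-- what changed: Replaced the quadratic recursion (repeated values[:-1] copies rebuilding the list) with one forward scan recording the last matching index, then a single copy with that index negated.
import Mathlib
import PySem

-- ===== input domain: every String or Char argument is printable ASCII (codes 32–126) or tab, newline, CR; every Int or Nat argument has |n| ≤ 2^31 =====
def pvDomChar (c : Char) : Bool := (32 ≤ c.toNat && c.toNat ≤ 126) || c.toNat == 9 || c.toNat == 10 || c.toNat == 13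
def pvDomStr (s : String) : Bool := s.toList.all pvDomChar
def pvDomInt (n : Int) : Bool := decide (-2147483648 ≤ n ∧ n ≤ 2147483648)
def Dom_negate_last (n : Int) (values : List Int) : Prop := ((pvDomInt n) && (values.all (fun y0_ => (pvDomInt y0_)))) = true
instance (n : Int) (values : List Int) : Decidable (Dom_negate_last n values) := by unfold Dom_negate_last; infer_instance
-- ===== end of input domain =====

-- B replaces A's quadratic recursion (repeated values[:-1] copies) with one forward scan
-- for the last index of n plus a single copy with that index negated (objective: faster).


-- ===== PORT A =====
def negate_last (n : Int) (values : List Int) : List Int :=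
  if values = [] then []
  else if n = PySem.List.pyGetD values (-1) 0 then
    PySem.List.slice values none (some (-1)) ++ [-1 * PySem.List.pyGetD values (-1) 0]
  else
    let negate_last_rest := negate_last n (PySem.List.slice values none (some (-1)))
    negate_last_rest ++ [PySem.List.pyGetD values (-1) 0]
termination_by values.length
decreasing_by
  simp only [PySem.List.slice_to_neg_one]
  have : values.length ≠ 0 := by simpa [List.length_eq_zero_iff] using ‹¬ values = []›
  simp [List.length_dropLast]; omega

-- ===== PORT B =====
def negate_last_alt (n : Int) (values : List Int) : List Int :=
  let idx := (PySem.List.enumerate values 0).foldl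
    (fun acc p => if p.2 = n then some p.1 else acc) (none : Option Int)
  match idx with
  | none => values
  | some i => PySem.List.pySetD values i (-1 * PySem.List.pyGetD values i 0)

-- ===== PRECONDITION & SPEC =====
def Spec_negate_last (n : Int) (values : List Int) (out : List Int) : Prop := out = negate_last_alt n values
instance (n : Int) (values : List Int) (out : List Int) : Decidable (Spec_negate_last n values out) := by unfold Spec_negate_last; infer_instance

-- ===== CLAIM (what is proved, stated in full; the proofs are below) =====
def Claim_equal_negate_last : Prop := ∀ (n : Int) (values : List Int), Dom_negate_last n values → Spec_negate_last n values (negate_last n values)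

-- ===== LEMMAS AND PROOFS =====

-- A on xs ++ [x]: peel off the last element.
theorem negate_last_append (n x : Int) (xs : List Int) :
    negate_last n (xs ++ [x]) =
      if n = x then xs ++ [-1 * x] else negate_last n xs ++ [x] := by
  rw [negate_last]
  simp [PySem.List.pyGetD_neg_one_append_singleton, PySem.List.slice_to_neg_one]

-- the scan in B, with an arbitrary accumulator and start
def lastIdxFold (n : Int) (l : List (Int × Int)) (acc : Option Int) : Option Int :=
  l.foldl (fun acc p => if p.2 = n then some p.1 else acc) acc

theorem lastIdxFold_spec (n : Int) (xs : List Int) :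
    ∀ (s : Nat) (acc : Option Int),
      lastIdxFold n (PySem.List.enumerate xs (s : Int)) acc = acc ∨
      ∃ k : Nat, k < xs.length ∧
        lastIdxFold n (PySem.List.enumerate xs (s : Int)) acc = some ((s + k : Nat) : Int) := by
  induction xs with
  | nil => intro s acc; left; simp [lastIdxFold, PySem.List.enumerate_nil]
  | cons x xs ih =>
    intro s acc
    rw [PySem.List.enumerate_cons]
    have hstep : ((s : Int) + 1) = ((s + 1 : Nat) : Int) := by push_cast; ring
    by_cases hx : x = n
    · rcases (hstep ▸ ih (s + 1) (some (s : Int))) with h | ⟨k, hk, h⟩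
      · right; exact ⟨0, by simp, by simpa [lastIdxFold, hx] using h⟩
      · right
        refine ⟨k + 1, by simp; omega, ?_⟩
        have : ((s + 1 + k : Nat) : Int) = ((s + (k + 1) : Nat) : Int) := by push_cast; ring
        simpa [lastIdxFold, hx, this] using h
    · rcases (hstep ▸ ih (s + 1) acc) with h | ⟨k, hk, h⟩
      · left; simpa [lastIdxFold, hx] using h
      · right
        refine ⟨k + 1, by simp; omega, ?_⟩
        have : ((s + 1 + k : Nat) : Int) = ((s + (k + 1) : Nat) : Int) := by push_cast; ring
        simpa [lastIdxFold, hx, this] using h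

theorem lastIdxFold_append (n x : Int) (xs : List Int) :
    lastIdxFold n (PySem.List.enumerate (xs ++ [x]) 0) none =
      if x = n then some (xs.length : Int)
      else lastIdxFold n (PySem.List.enumerate xs 0) none := by
  rw [PySem.List.enumerate_append]
  simp [lastIdxFold, List.foldl_append, PySem.List.enumerate_cons, PySem.List.enumerate_nil]

theorem negate_last_alt_eq (n : Int) (values : List Int) :
    negate_last_alt n values =
      match lastIdxFold n (PySem.List.enumerate values 0) none with
      | none => values
      | some i => PySem.List.pySetD values i (-1 * PySem.List.pyGetD values i 0) := rfl

theorem negate_last_alt_append (n x : Int) (xs : List Int) :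
    negate_last_alt n (xs ++ [x]) =
      if n = x then xs ++ [-1 * x] else negate_last_alt n xs ++ [x] := by
  rw [negate_last_alt_eq, lastIdxFold_append]
  by_cases hx : x = n
  · have hn : n = x := hx.symm
    rw [if_pos hx, if_pos hn]
    dsimp only
    rw [PySem.List.pySetD_natCast]
    have hget : PySem.List.pyGetD (xs ++ [x]) (xs.length : Int) 0 = x := by
      rw [PySem.List.pyGetD_natCast]; simp
    rw [hget, List.set_append_right _ _ (Nat.le_refl _)]
    simp only [Nat.sub_self, List.set_cons_zero]
  · have hn : ¬ n = x := fun h => hx h.symm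
    simp only [hx, hn, ite_false]
    rcases lastIdxFold_spec n xs 0 none with h | ⟨k, hk, h⟩ <;>
      simp only [Nat.cast_zero, Nat.zero_add] at h
    · rw [h, negate_last_alt_eq, h]
    · rw [h, negate_last_alt_eq, h]
      dsimp only
      rw [PySem.List.pySetD_natCast, PySem.List.pySetD_natCast]
      have hget : PySem.List.pyGetD (xs ++ [x]) (k : Int) 0 = PySem.List.pyGetD xs (k : Int) 0 := by
        rw [PySem.List.pyGetD_natCast, PySem.List.pyGetD_natCast]
        simp [List.getD, List.getElem?_append_left hk]
      rw [hget, List.set_append_left _ _ hk]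

theorem negate_last_eq_alt (n : Int) (values : List Int) :
    negate_last n values = negate_last_alt n values := by
  induction values using List.reverseRecOn with
  | nil => rw [negate_last]; rfl
  | append_singleton xs x ih =>
    rw [negate_last_append, negate_last_alt_append]
    by_cases h : n = x <;> simp [h, ih]

-- ===== VERDICT (by name: the statement is the Claim_ definition above) =====
theorem negate_last_spec : Claim_equal_negate_last := by
  intro n values _
  exact negate_last_eq_alt n values
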